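-- pv_equiv track=rewrite | github.com/Prostream/leetCodePractice | OA preparation/connect.py | connectedSum
-- ===== SOURCE A (Python) =====
-- import math
--
-- def connectedSum(graph_nodes, graph_from, graph_to):
--     """
--     graph_nodes: int, 节点总数(编号1..graph_nodes)
--     graph_from, graph_to: List[int], 每条边的两个端点
--     返回: sum of ceil(sqrt(size_of_component)) over all components
--     """
--     n = graph_nodes
--
--     # 并查集
--     parent = list(range(n + 1))  # 下标 1..n
--     size = [1] * (n + 1)
--
--     def find(x):
--         if parent[x] != x:
--             parent[x] = find(parent[x])
--         return parent[x]
--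
--     def union(a, b):
--         ra, rb = find(a), find(b)
--         if ra != rb:
--             if size[ra] < size[rb]:
--                 ra, rb = rb, ra
--             parent[rb] = ra
--             size[ra] += size[rb]
--
--     # 读入边
--     for u, v in zip(graph_from, graph_to):
--         union(u, v)
--
--     # 遍历所有根，计算各自集合大小
--     visited_root = set()
--     ans = 0
--     for i in range(1, n + 1):
--         r = find(i)
--         if r not in visited_root:
--             visited_root.add(r)
--             comp_size = size[r]
--             # ceil of sqrt
--             sr = math.isqrt(comp_size)  # integer sqrt (floor)
--             if sr * sr == comp_size:
--                 ans += sr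
--             else:
--                 ans += (sr + 1)
--
--     return ans
-- ===== SOURCE B (Python) =====
-- import math
--
-- def connectedSum(graph_nodes, graph_from, graph_to):
--     n = graph_nodes
--     # weighted quick-find: label[x] = component id, members[id] = nodes with that id;
--     # each merge relabels the smaller component (O((n+m) log n) total).
--     label = list(range(n + 1))
--     members = {i: [i] for i in range(n + 1)}
--     for u, v in zip(graph_from, graph_to):
--         lu, lv = label[u], label[v]
--         if lu != lv:
--             if len(members[lu]) < len(members[lv]):
--                 lu, lv = lv, lu
--             for x in members[lv]:
--                 label[x] = lu
--             members[lu].extend(members[lv])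
--             del members[lv]
--     sizes = {}
--     for i in range(1, n + 1):
--         sizes[label[i]] = sizes.get(label[i], 0) + 1
--     ans = 0
--     for c in sizes.values():
--         s = math.isqrt(c)
--         ans += s if s * s == c else s + 1
--     return ans
-- ===== Notes on version B (the rewrite author's own statement) =====
-- stated objective: alternative
-- what changed: Replaces union-find (parent forest with recursive find + path compression + union by size) by weighted quick-find: a direct component-label array plus per-component member lists, merging by relabelling the smaller component's members, then counting label frequencies with a dict instead of a visited-root scan.
-- outside the precondition, e.g. on connectedSum(2, [0], [1]): A returns 3, B returns 2; on connectedSum(2, [-2], [-3]): A returns 3, B returns 2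
import Mathlib
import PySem

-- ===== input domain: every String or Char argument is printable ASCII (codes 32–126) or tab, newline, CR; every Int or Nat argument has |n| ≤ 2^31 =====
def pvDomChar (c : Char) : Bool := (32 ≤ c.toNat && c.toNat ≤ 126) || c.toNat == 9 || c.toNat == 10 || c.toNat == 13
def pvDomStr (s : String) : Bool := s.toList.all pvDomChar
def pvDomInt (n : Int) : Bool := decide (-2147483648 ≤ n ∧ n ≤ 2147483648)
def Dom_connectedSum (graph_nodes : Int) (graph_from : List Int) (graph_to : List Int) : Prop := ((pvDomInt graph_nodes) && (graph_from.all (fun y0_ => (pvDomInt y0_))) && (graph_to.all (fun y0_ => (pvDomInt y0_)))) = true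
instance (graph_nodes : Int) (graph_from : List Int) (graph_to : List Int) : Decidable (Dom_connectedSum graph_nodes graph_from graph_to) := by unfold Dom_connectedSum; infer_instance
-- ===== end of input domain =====

-- B replaces A's union-find by weighted quick-find (label array + member lists, relabel
-- the smaller side on merge, count labels with a dict) — an alternative algorithm.

-- ceil(isqrt) snippet shared verbatim by both Pythons
def pvCeilSqrt (c : Int) : Int :=
  let sr : Int := (Nat.sqrt c.toNat : Int)
  if sr * sr = c then sr else sr + 1

-- ===== PORT A =====
-- recursive find with path compression; fuel = n+1 bounds the recursion depth
-- (inside Pre_ every parent chain is shorter, proved below)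
def pvFindA : Nat → List Int → Int → Int × List Int
  | 0, parent, x => (x, parent)
  | fuel+1, parent, x =>
    if PySem.List.pyGetD parent x 0 ≠ x then
      let res := pvFindA fuel parent (PySem.List.pyGetD parent x 0)
      (res.1, PySem.List.pySetD res.2 x res.1)
    else (x, parent)

def pvUnionA (fuel : Nat) (ps : List Int × List Int) (a b : Int) : List Int × List Int :=
  let fa := pvFindA fuel ps.1 a
  let fb := pvFindA fuel fa.2 b
  if fa.1 ≠ fb.1 then
    let pr := if PySem.List.pyGetD ps.2 fa.1 0 < PySem.List.pyGetD ps.2 fb.1 0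
              then (fb.1, fa.1) else (fa.1, fb.1)
    (PySem.List.pySetD fb.2 pr.2 pr.1,
     PySem.List.pySetD ps.2 pr.1 (PySem.List.pyGetD ps.2 pr.1 0 + PySem.List.pyGetD ps.2 pr.2 0))
  else (fb.2, ps.2)

def connectedSum (graph_nodes : Int) (graph_from : List Int) (graph_to : List Int) : Int :=
  let n := graph_nodes
  let fuel := (n + 1).toNat
  let parent0 := PySem.List.pyRange 0 (n + 1) 1
  let size0 := List.replicate (n + 1).toNat (1 : Int)
  let ps := (List.zip graph_from graph_to).foldl
      (fun ps uv => pvUnionA fuel ps uv.1 uv.2) (parent0, size0)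
  let fin := (PySem.List.pyRange 1 (n + 1) 1).foldl
      (fun st i =>
        let fr := pvFindA fuel st.1 i
        if ¬ (PySem.Set.contains st.2.1 fr.1) then
          (fr.2, PySem.Set.add st.2.1 fr.1, st.2.2 + pvCeilSqrt (PySem.List.pyGetD ps.2 fr.1 0))
        else (fr.2, st.2.1, st.2.2))
      (ps.1, (PySem.Set.empty : PySem.Set Int), (0 : Int))
  fin.2.2

-- ===== PORT B =====
def pvMergeB (st : List Int × PySem.Dict Int (List Int)) (u v : Int) :
    List Int × PySem.Dict Int (List Int) :=
  let lu := PySem.List.pyGetD st.1 u 0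
  let lv := PySem.List.pyGetD st.1 v 0
  if lu ≠ lv then
    let pr := if (st.2.getD lu []).length < (st.2.getD lv []).length
              then (lv, lu) else (lu, lv)
    ((st.2.getD pr.2 []).foldl (fun lab x => PySem.List.pySetD lab x pr.1) st.1,
     (st.2.insert pr.1 (st.2.getD pr.1 [] ++ st.2.getD pr.2 [])).erase pr.2)
  else st

def connectedSum_alt (graph_nodes : Int) (graph_from : List Int) (graph_to : List Int) : Int :=
  let n := graph_nodes
  let label0 := PySem.List.pyRange 0 (n + 1) 1
  let members0 : PySem.Dict Int (List Int) :=
    (PySem.List.pyRange 0 (n + 1) 1).foldl (fun d i => d.insert i [i]) PySem.Dict.empty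
  let st := (List.zip graph_from graph_to).foldl
      (fun st uv => pvMergeB st uv.1 uv.2) (label0, members0)
  let sizes := (PySem.List.pyRange 1 (n + 1) 1).foldl
      (fun d i => d.insert (PySem.List.pyGetD st.1 i 0)
                           (d.getD (PySem.List.pyGetD st.1 i 0) 0 + 1))
      (PySem.Dict.empty : PySem.Dict Int Int)
  sizes.values.foldl (fun ans c => ans + pvCeilSqrt c) 0

-- ===== PRECONDITION & SPEC =====
-- Pre_ admits every edge endpoint that denotes a real node 1..n (including Python's
-- negative-index wraparound -n..-1, which both programs read as node n+1+u); excluded are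
-- endpoints that raise IndexError and the two aliases of the unused array slot 0
-- (endpoint 0 and -(n+1)), where A's visited loop silently miscounts that slot.
def Pre_connectedSum (graph_nodes : Int) (graph_from : List Int) (graph_to : List Int) : Prop :=
  ∀ p ∈ List.zip graph_from graph_to,
    ((1 ≤ p.1 ∧ p.1 ≤ graph_nodes) ∨ (-graph_nodes ≤ p.1 ∧ p.1 ≤ -1)) ∧
    ((1 ≤ p.2 ∧ p.2 ≤ graph_nodes) ∨ (-graph_nodes ≤ p.2 ∧ p.2 ≤ -1))
instance (graph_nodes : Int) (graph_from : List Int) (graph_to : List Int) : Decidable (Pre_connectedSum graph_nodes graph_from graph_to) := by unfold Pre_connectedSum; infer_instance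

def pvWitness_connectedSum : Int × List Int × List Int := (3, [1, 2], [2, 3])

def Spec_connectedSum (graph_nodes : Int) (graph_from : List Int) (graph_to : List Int) (out : Int) : Prop := out = connectedSum_alt graph_nodes graph_from graph_to
instance (graph_nodes : Int) (graph_from : List Int) (graph_to : List Int) (out : Int) : Decidable (Spec_connectedSum graph_nodes graph_from graph_to out) := by unfold Spec_connectedSum; infer_instance

-- ===== CLAIM (what is proved, stated in full; the proofs are below) =====
def Claim_equal_connectedSum : Prop := ∀ (graph_nodes : Int) (graph_from : List Int) (graph_to : List Int), Dom_connectedSum graph_nodes graph_from graph_to → Pre_connectedSum graph_nodes graph_from graph_to → Spec_connectedSum graph_nodes graph_from graph_to (connectedSum graph_nodes graph_from graph_to)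

-- ===== LEMMAS AND PROOFS =====

-- getter abbreviation used throughout the proofs
def pvG (l : List Int) (x : Int) : Int := PySem.List.pyGetD l x 0

-- pure (non-compressing) fueled root of x in the parent forest
def pvRoot : Nat → List Int → Int → Int
  | 0, _, x => x
  | f+1, p, x => if pvG p x = x then x else pvRoot f p (pvG p x)

-- well-formed parent forest on 0..N-1, certified by a strictly decreasing rank h < N
def pvWf (N : Nat) (p : List Int) (h : Int → Nat) : Prop :=
  p.length = N ∧
  (∀ x : Int, 0 ≤ x → x < (N:Int) → 0 ≤ pvG p x ∧ pvG p x < (N:Int)) ∧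
  (∀ x : Int, 0 ≤ x → x < (N:Int) → pvG p x ≠ x → h (pvG p x) < h x) ∧
  (∀ x : Int, 0 ≤ x → x < (N:Int) → h x < N)

-- joint invariant tying A's (parent, size) to B's (label, members)
structure pvInv (N : Nat) (parent size label : List Int)
    (members : PySem.Dict Int (List Int)) : Prop where
  plen : parent.length = N
  slen : size.length = N
  llen : label.length = N
  pcl : ∀ x : Int, 0 ≤ x → x < (N:Int) → 0 ≤ pvG parent x ∧ pvG parent x < (N:Int)
  wf : ∃ h : Int → Nat,
      (∀ x : Int, 0 ≤ x → x < (N:Int) → pvG parent x ≠ x → h (pvG parent x) < h x) ∧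
      (∀ x : Int, 0 ≤ x → x < (N:Int) → h x + 1 ≤ label.count (pvG label x))
  sizes : ∀ x : Int, 0 ≤ x → x < (N:Int) → pvG parent x = x →
      pvG size x = (label.count (pvG label x) : Int)
  part : ∀ x y : Int, 0 ≤ x → x < (N:Int) → 0 ≤ y → y < (N:Int) →
      (pvRoot N parent x = pvRoot N parent y ↔ pvG label x = pvG label y)
  lrange : ∀ x : Int, 0 ≤ x → x < (N:Int) → 0 ≤ pvG label x ∧ pvG label x < (N:Int)
  lpos : ∀ x : Int, 1 ≤ x → x < (N:Int) → 1 ≤ pvG label x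
  lzero : 0 < N → pvG label 0 = 0
  mem : ∀ l : Int, (∃ x : Int, 0 ≤ x ∧ x < (N:Int) ∧ pvG label x = l) →
      ∃ L, members.get? l = some L ∧
        ∀ x : Int, x ∈ L ↔ (0 ≤ x ∧ x < (N:Int) ∧ pvG label x = l)

-- ---- basic list-access lemmas ----
theorem pvG_set (l : List Int) (x y v : Int) (hx0 : 0 ≤ x) (hx : x < (l.length:Int))
    (hy0 : 0 ≤ y) (hy : y < (l.length:Int)) :
    pvG (PySem.List.pySetD l x v) y = if y = x then v else pvG l y := by
  unfold pvG
  rw [PySem.List.pySetD_of_nonneg l v hx0]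
  have hset : (l.set x.toNat v).length = l.length := by simp
  rw [PySem.List.pyGetD_eq_getElem _ _ hy0 (by omega), PySem.List.pyGetD_eq_getElem _ _ hy0 (by omega)]
  rw [List.getElem_set]
  by_cases hxy : y = x
  · simp [hxy]
  · have hne : x.toNat ≠ y.toNat := by omega
    simp [hne, hxy]

theorem pvG_range (b x : Int) (hx0 : 0 ≤ x) (hx : x < b) :
    pvG (PySem.List.pyRange 0 b 1) x = x := by
  unfold pvG
  have hlen : (PySem.List.pyRange 0 b 1).length = (b - 0).toNat := PySem.List.length_pyRange_one 0 b
  rw [PySem.List.pyGetD_eq_getElem _ _ hx0 (by omega)]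
  rw [PySem.List.getElem_pyRange_one 0 b x.toNat (by omega)]
  omega

theorem pvG_replicate (k : Nat) (x : Int) (hx0 : 0 ≤ x) (hx : x < (k:Int)) :
    pvG (List.replicate k (1:Int)) x = 1 := by
  unfold pvG
  rw [PySem.List.pyGetD_eq_getElem _ _ hx0 (by simpa using hx)]
  simp

theorem pvG_natCast (l : List Int) (k : Nat) (hk : k < l.length) :
    pvG l (k : Int) = l[k] := by
  unfold pvG
  rw [PySem.List.pyGetD_eq_getElem _ _ (by omega) (by omega)]
  simp

theorem pvLen_range (b : Int) : (PySem.List.pyRange 0 b 1).length = b.toNat := by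
  simpa using PySem.List.length_pyRange_one 0 b

-- ---- negative-index wraparound (Python's l[-k]) ----
theorem pvG_wrapneg (l : List Int) (u : Int) (h0 : -(l.length:Int) ≤ u) (h1 : u < 0) :
    pvG l u = pvG l (u + l.length) := by
  have hgen : ∀ k : Nat, 0 < k → k ≤ l.length →
      pvG l (-(k:Int)) = pvG l (-(k:Int) + l.length) := by
    intro k hk hk'
    unfold pvG
    rw [PySem.List.pyGetD_neg_natCast l k 0 hk hk',
      PySem.List.pyGetD_eq_getElem _ _ (by omega) (by omega)]
    have hidx : (-(k:Int) + l.length).toNat = l.length - k := by omega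
    simp [hidx]
  have hk : u = -(((-u).toNat : Nat) : Int) := by omega
  rw [hk]
  exact hgen (-u).toNat (by omega) (by omega)

theorem pvSetD_wrap (l : List Int) (u v : Int) (h0 : -(l.length:Int) ≤ u) (h1 : u < 0) :
    PySem.List.pySetD l u v = PySem.List.pySetD l (u + l.length) v := by
  unfold PySem.List.pySetD PySem.List.pySet? PySem.List.pyIdx?
  rw [if_neg (by omega : ¬ (0:Int) ≤ u), if_pos h0,
    if_pos (by omega : (0:Int) ≤ u + l.length), if_pos (by omega : u + (l.length:Int) < l.length)]
  have hidx : l.length - (-u).toNat = (u + (l.length:Int)).toNat := by omega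
  rw [hidx]

theorem pvFindA_fix (fuel : Nat) (p : List Int) (x : Int) (hfix : pvG p x = x) :
    pvFindA fuel p x = (x, p) := by
  cases fuel with
  | zero => rfl
  | succ f =>
    simp only [pvFindA]
    rw [if_neg (not_not_intro (show PySem.List.pyGetD p x 0 = x from hfix))]

theorem pvFindA_len : ∀ (fuel : Nat) (p : List Int) (x : Int),
    (pvFindA fuel p x).2.length = p.length := by
  intro fuel
  induction fuel with
  | zero => intro p x; rfl
  | succ f ih =>
    intro p x
    simp only [pvFindA]
    by_cases hc : PySem.List.pyGetD p x 0 ≠ x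
    · rw [if_pos hc]
      rw [PySem.List.length_pySetD]
      exact ih p _
    · rw [if_neg hc]

theorem pvFindA_wrap (p : List Int) (u : Int)
    (h0 : -(p.length:Int) ≤ u) (h1 : u < 0)
    (hcl : 0 ≤ pvG p (u + p.length) ∧ pvG p (u + p.length) < (p.length:Int)) :
    ∀ fuel : Nat, 0 < fuel → pvFindA fuel p u = pvFindA fuel p (u + p.length) := by
  intro fuel hfuel
  obtain ⟨f, rfl⟩ : ∃ f, fuel = f + 1 := ⟨fuel - 1, by omega⟩
  have hgs : pvG p u = pvG p (u + p.length) := pvG_wrapneg p u h0 h1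
  have hne : PySem.List.pyGetD p u 0 ≠ u := by
    show pvG p u ≠ u
    rw [hgs]
    omega
  by_cases hfx : pvG p (u + p.length) = (u + p.length)
  · rw [pvFindA_fix (f+1) p _ hfx]
    simp only [pvFindA]
    rw [if_pos hne]
    have harg : PySem.List.pyGetD p u 0 = u + p.length := by
      show pvG p u = _
      rw [hgs, hfx]
    rw [harg, pvFindA_fix f p _ hfx]
    rw [pvSetD_wrap p u _ h0 h1]
    have hval : p[(u + (p.length:Int)).toNat] = u + p.length := by
      have h2 := hfx
      rw [pvG, PySem.List.pyGetD_eq_getElem _ _ (by omega) (by omega)] at h2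
      exact h2
    have hlt : (u + (p.length:Int)).toNat < p.length := by omega
    have hself : PySem.List.pySetD p (u + p.length) (u + p.length) = p := by
      rw [PySem.List.pySetD_of_nonneg _ _ (by omega)]
      calc p.set (u + (p.length:Int)).toNat (u + (p.length:Int))
          = p.set (u + (p.length:Int)).toNat p[(u + (p.length:Int)).toNat] := by rw [hval]
        _ = p := List.set_getElem_self hlt
    rw [hself]
  · have hfx' : PySem.List.pyGetD p (u + p.length) 0 ≠ u + p.length := hfx
    simp only [pvFindA]
    rw [if_pos hne, if_pos hfx']
    have harg : PySem.List.pyGetD p u 0 = PySem.List.pyGetD p (u + p.length) 0 := hgs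
    rw [harg]
    have hlen2 : (pvFindA f p (PySem.List.pyGetD p (u + p.length) 0)).2.length = p.length :=
      pvFindA_len f p _
    rw [pvSetD_wrap _ u _ (by rw [hlen2]; exact h0) h1, hlen2]

-- ---- counting lemmas ----
theorem pvCount_range (b x : Int) (hx0 : 0 ≤ x) (hx : x < b) :
    (PySem.List.pyRange 0 b 1).count x = 1 := by
  exact List.count_eq_one_of_mem (PySem.List.nodup_pyRange_one 0 b)
    (PySem.List.mem_pyRange_one.2 ⟨hx0, hx⟩)

theorem pvCount_map_merge (l : List Int) (wn ls : Int) (hne : wn ≠ ls) :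
    (l.map (fun t => if t = ls then wn else t)).count wn = l.count wn + l.count ls := by
  induction l with
  | nil => simp
  | cons a l ih =>
    by_cases hals : a = ls
    · simp [List.count_cons, hals, ih]
      split_ifs <;> omega
    · by_cases hawn : a = wn
      · simp [List.count_cons, hals, hawn, ih]
        split_ifs <;> omega
      · simp [List.count_cons, hals, hawn, ih]

theorem pvCount_map_other (l : List Int) (wn ls c : Int) (h1 : c ≠ wn) (h2 : c ≠ ls) :
    (l.map (fun t => if t = ls then wn else t)).count c = l.count c := by
  induction l with
  | nil => simp
  | cons a l ih =>
    by_cases hals : a = ls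
    · simp [List.count_cons, hals, ih, Ne.symm h1, Ne.symm h2]
    · simp [List.count_cons, hals, ih]

theorem pvCount_two_le_length (l : List Int) (a b : Int) (hne : a ≠ b) :
    l.count a + l.count b ≤ l.length := by
  induction l with
  | nil => simp
  | cons c l ih =>
    by_cases hca : c = a
    · simp [List.count_cons, hca]
      split_ifs <;> omega
    · by_cases hcb : c = b
      · simp [List.count_cons, hca, hcb]
        split_ifs <;> omega
      · simp [List.count_cons, hca, hcb]
        omega

-- ---- pvRoot lemmas over a well-formed forest ----
theorem pvRoot_fix (f : Nat) (p : List Int) (x : Int) (hfix : pvG p x = x) :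
    pvRoot f p x = x := by
  cases f with
  | zero => rfl
  | succ f => simp [pvRoot, hfix]

theorem pvRoot_fuel (N : Nat) (p : List Int) (h : Int → Nat) (hwf : pvWf N p h) :
    ∀ n (x : Int), h x = n → 0 ≤ x → x < (N:Int) → ∀ f f', h x < f → h x < f' →
      pvRoot f p x = pvRoot f' p x := by
  intro n
  induction n using Nat.strong_induction_on with
  | _ n ih =>
    intro x hxn hx0 hx f f' hf hf'
    obtain ⟨hlen, hcl, hdec, hbd⟩ := hwf
    cases f with
    | zero => omega
    | succ f =>
      cases f' with
      | zero => omega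
      | succ f' =>
        by_cases hfix : pvG p x = x
        · simp [pvRoot, hfix]
        · simp only [pvRoot, if_neg hfix]
          have hd := hdec x hx0 hx hfix
          exact ih (h (pvG p x)) (by omega) (pvG p x) rfl
            (hcl x hx0 hx).1 (hcl x hx0 hx).2 f f' (by omega) (by omega)

theorem pvRoot_step (N : Nat) (p : List Int) (h : Int → Nat) (hwf : pvWf N p h)
    (x : Int) (hx0 : 0 ≤ x) (hx : x < (N:Int)) (hne : pvG p x ≠ x) :
    pvRoot N p x = pvRoot N p (pvG p x) := by
  have hwf2 := hwf
  obtain ⟨hlen, hcl, hdec, hbd⟩ := hwf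
  have hbx := hbd x hx0 hx
  cases hN : N with
  | zero => omega
  | succ M =>
    subst hN
    simp only [pvRoot, if_neg hne]
    exact pvRoot_fuel (M+1) p h hwf2 _ (pvG p x) rfl (hcl x hx0 hx).1 (hcl x hx0 hx).2
      M (M+1) (by have := hdec x hx0 hx hne; omega) (by have := hdec x hx0 hx hne; omega)

theorem pvRoot_spec (N : Nat) (p : List Int) (h : Int → Nat) (hwf : pvWf N p h) :
    ∀ n (x : Int), h x = n → 0 ≤ x → x < (N:Int) →
      (0 ≤ pvRoot N p x ∧ pvRoot N p x < (N:Int)) ∧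
      pvG p (pvRoot N p x) = pvRoot N p x ∧
      h (pvRoot N p x) ≤ h x ∧ (pvG p x ≠ x → h (pvRoot N p x) < h x) := by
  intro n
  induction n using Nat.strong_induction_on with
  | _ n ih =>
    intro x hxn hx0 hx
    have hwf2 := hwf
    obtain ⟨hlen, hcl, hdec, hbd⟩ := hwf
    by_cases hfix : pvG p x = x
    · rw [pvRoot_fix N p x hfix]
      exact ⟨⟨hx0, hx⟩, hfix, le_refl _, fun hc => absurd hfix hc⟩
    · have hstep := pvRoot_step N p h hwf2 x hx0 hx hfix
      have hd := hdec x hx0 hx hfix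
      obtain ⟨hin, hfx, hle, _⟩ := ih (h (pvG p x)) (by omega) (pvG p x) rfl
        (hcl x hx0 hx).1 (hcl x hx0 hx).2
      rw [hstep]
      exact ⟨hin, hfx, by omega, fun _ => by omega⟩

theorem pvRoot_root (N : Nat) (p : List Int) (h : Int → Nat) (hwf : pvWf N p h)
    (x : Int) (hx0 : 0 ≤ x) (hx : x < (N:Int)) :
    pvRoot N p (pvRoot N p x) = pvRoot N p x := by
  obtain ⟨_, hfx, _, _⟩ := pvRoot_spec N p h hwf (h x) x rfl hx0 hx
  exact pvRoot_fix N p _ hfx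

-- ---- path compression preserves the forest, its roots and its root map ----
theorem pvCompress (N : Nat) (p : List Int) (h : Int → Nat) (hwf : pvWf N p h)
    (x : Int) (hx0 : 0 ≤ x) (hx : x < (N:Int)) (hne : pvG p x ≠ x) :
    pvWf N (PySem.List.pySetD p x (pvRoot N p x)) h ∧
    (∀ y : Int, 0 ≤ y → y < (N:Int) →
      pvRoot N (PySem.List.pySetD p x (pvRoot N p x)) y = pvRoot N p y) ∧
    (∀ y : Int, 0 ≤ y → y < (N:Int) →
      (pvG (PySem.List.pySetD p x (pvRoot N p x)) y = y ↔ pvG p y = y)) := by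
  have hwf2 := hwf
  obtain ⟨hlen, hcl, hdec, hbd⟩ := hwf
  obtain ⟨⟨hr0, hrN⟩, hrfix, hrle, hrlt⟩ := pvRoot_spec N p h hwf2 (h x) x rfl hx0 hx
  have hrltx : h (pvRoot N p x) < h x := hrlt hne
  have hrnex : pvRoot N p x ≠ x := by
    intro he; rw [he] at hrltx; omega
  have hlen' : (PySem.List.pySetD p x (pvRoot N p x)).length = N := by
    rw [PySem.List.length_pySetD]; exact hlen
  have hget : ∀ y : Int, 0 ≤ y → y < (N:Int) →
      pvG (PySem.List.pySetD p x (pvRoot N p x)) y = if y = x then pvRoot N p x else pvG p y := by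
    intro y hy0 hy
    exact pvG_set p x y _ hx0 (by omega) hy0 (by omega)
  have hwf' : pvWf N (PySem.List.pySetD p x (pvRoot N p x)) h := by
    refine ⟨hlen', ?_, ?_, hbd⟩
    · intro y hy0 hy
      rw [hget y hy0 hy]
      by_cases hyx : y = x
      · simp [hyx, hr0, hrN]
      · simp only [if_neg hyx]; exact hcl y hy0 hy
    · intro y hy0 hy hney
      rw [hget y hy0 hy] at *
      by_cases hyx : y = x
      · simp only [hyx, if_pos rfl] at *
        exact hrltx
      · simp only [if_neg hyx] at *
        exact hdec y hy0 hy hney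
  have hroots : ∀ y : Int, 0 ≤ y → y < (N:Int) →
      (pvG (PySem.List.pySetD p x (pvRoot N p x)) y = y ↔ pvG p y = y) := by
    intro y hy0 hy
    rw [hget y hy0 hy]
    by_cases hyx : y = x
    · subst hyx
      simp only [if_pos rfl]
      constructor
      · intro hc; exact absurd hc.symm (by exact fun hh => hrnex hh.symm)
      · intro hc; exact absurd hc hne
    · simp [hyx]
  refine ⟨hwf', ?_, hroots⟩
  have key : ∀ n (y : Int), h y = n → 0 ≤ y → y < (N:Int) →
      pvRoot N (PySem.List.pySetD p x (pvRoot N p x)) y = pvRoot N p y := by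
    intro n
    induction n using Nat.strong_induction_on with
    | _ n ih =>
      intro y hyn hy0 hy
      by_cases hfixy : pvG p y = y
      · have hfixy' : pvG (PySem.List.pySetD p x (pvRoot N p x)) y = y := (hroots y hy0 hy).2 hfixy
        rw [pvRoot_fix N _ y hfixy', pvRoot_fix N p y hfixy]
      · by_cases hyx : y = x
        · subst hyx
          have hg : pvG (PySem.List.pySetD p y (pvRoot N p y)) y = pvRoot N p y := by
            rw [hget y hy0 hy]; simp
          have hstep' := pvRoot_step N _ h hwf' y hy0 hy (by rw [hg]; exact hrnex)
          rw [hstep', hg]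
          have hfixr : pvG (PySem.List.pySetD p y (pvRoot N p y)) (pvRoot N p y) = pvRoot N p y := by
            rw [hget _ hr0 hrN, if_neg hrnex]; exact hrfix
          exact pvRoot_fix N _ _ hfixr
        · have hg : pvG (PySem.List.pySetD p x (pvRoot N p x)) y = pvG p y := by
            rw [hget y hy0 hy, if_neg hyx]
          have hstep1 := pvRoot_step N _ h hwf' y hy0 hy (by rw [hg]; exact hfixy)
          have hstep2 := pvRoot_step N p h hwf2 y hy0 hy hfixy
          rw [hstep1, hg, hstep2]
          have hd := hdec y hy0 hy hfixy
          exact ih (h (pvG p y)) (by omega) (pvG p y) rfl (hcl y hy0 hy).1 (hcl y hy0 hy).2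
  intro y hy0 hy
  exact key (h y) y rfl hy0 hy

-- ---- find: returns the root, compresses, preserves everything ----
theorem pvFind_spec (N : Nat) (h : Int → Nat) :
    ∀ (fuel : Nat) (p : List Int) (x : Int), pvWf N p h → 0 ≤ x → x < (N:Int) →
      h x < fuel →
      (pvFindA fuel p x).1 = pvRoot N p x ∧
      pvWf N (pvFindA fuel p x).2 h ∧
      (∀ y : Int, 0 ≤ y → y < (N:Int) →
        pvRoot N (pvFindA fuel p x).2 y = pvRoot N p y) ∧
      (∀ y : Int, 0 ≤ y → y < (N:Int) →
        (pvG (pvFindA fuel p x).2 y = y ↔ pvG p y = y)) := by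
  intro fuel
  induction fuel with
  | zero =>
    intro p x hwf hx0 hx hf
    omega
  | succ fuel ih =>
    intro p x hwf hx0 hx hf
    have hwf2 := hwf
    obtain ⟨hlen, hcl, hdec, hbd⟩ := hwf
    by_cases hfix : pvG p x = x
    · have : pvFindA (fuel+1) p x = (x, p) := by
        simp only [pvFindA]
        rw [if_neg (by simpa [pvG] using not_not_intro hfix)]
      rw [this]
      refine ⟨(pvRoot_fix N p x hfix).symm, hwf2, fun y _ _ => rfl, fun y _ _ => Iff.rfl⟩
    · have hd := hdec x hx0 hx hfix
      have hrec := ih p (pvG p x) hwf2 (hcl x hx0 hx).1 (hcl x hx0 hx).2 (by omega)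
      obtain ⟨h1, h2, h3, h4⟩ := hrec
      have hunf : pvFindA (fuel+1) p x =
          ((pvFindA fuel p (pvG p x)).1,
           PySem.List.pySetD (pvFindA fuel p (pvG p x)).2 x (pvFindA fuel p (pvG p x)).1) := by
        simp only [pvFindA]
        rw [if_pos (by simpa [pvG] using hfix)]
        rfl
      have hroot1 : (pvFindA fuel p (pvG p x)).1 = pvRoot N p x := by
        rw [h1, ← pvRoot_step N p h hwf2 x hx0 hx hfix]
      have hnex'' : pvG (pvFindA fuel p (pvG p x)).2 x ≠ x := by
        intro hc; exact hfix ((h4 x hx0 hx).1 hc)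
      have hrooteq : pvRoot N (pvFindA fuel p (pvG p x)).2 x = pvRoot N p x := h3 x hx0 hx
      have hcomp := pvCompress N (pvFindA fuel p (pvG p x)).2 h h2 x hx0 hx hnex''
      rw [hrooteq] at hcomp
      obtain ⟨c1, c2, c3⟩ := hcomp
      rw [hunf]
      refine ⟨hroot1, ?_, ?_, ?_⟩
      · simpa [hroot1] using c1
      · intro y hy0 hy
        have := c2 y hy0 hy
        rw [hroot1]
        rw [this, h3 y hy0 hy]
      · intro y hy0 hy
        rw [hroot1]
        exact (c3 y hy0 hy).trans (h4 y hy0 hy)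

-- ---- union: redirect loser root to winner root ----
theorem pvUnion_root (N : Nat) (p : List Int) (h : Int → Nat) (hwf : pvWf N p h)
    (ra rb : Int) (ha0 : 0 ≤ ra) (ha : ra < (N:Int)) (hb0 : 0 ≤ rb) (hb : rb < (N:Int))
    (hra : pvG p ra = ra) (hrb : pvG p rb = rb) (hne : ra ≠ rb)
    (hbound : ∀ y : Int, 0 ≤ y → y < (N:Int) →
      (if pvRoot N p y = rb then h y + h ra + 1 else h y) < N) :
    pvWf N (PySem.List.pySetD p rb ra)
      (fun y => if pvRoot N p y = rb then h y + h ra + 1 else h y) ∧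
    (∀ y : Int, 0 ≤ y → y < (N:Int) →
      pvRoot N (PySem.List.pySetD p rb ra) y =
        if pvRoot N p y = rb then ra else pvRoot N p y) := by
  have hwf2 := hwf
  obtain ⟨hlen, hcl, hdec, hbd⟩ := hwf
  have hlen' : (PySem.List.pySetD p rb ra).length = N := by
    rw [PySem.List.length_pySetD]; exact hlen
  have hget : ∀ y : Int, 0 ≤ y → y < (N:Int) →
      pvG (PySem.List.pySetD p rb ra) y = if y = rb then ra else pvG p y := by
    intro y hy0 hy
    exact pvG_set p rb y _ hb0 (by omega) hy0 (by omega)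
  have hrra : pvRoot N p ra = ra := pvRoot_fix N p ra hra
  have hrrb : pvRoot N p rb = rb := pvRoot_fix N p rb hrb
  have hwf' : pvWf N (PySem.List.pySetD p rb ra)
      (fun y => if pvRoot N p y = rb then h y + h ra + 1 else h y) := by
    refine ⟨hlen', ?_, ?_, hbound⟩
    · intro y hy0 hy
      rw [hget y hy0 hy]
      by_cases hyrb : y = rb
      · simp [hyrb, ha0, ha]
      · simp only [if_neg hyrb]; exact hcl y hy0 hy
    · intro y hy0 hy hney
      rw [hget y hy0 hy] at hney
      show (if pvRoot N p (pvG (PySem.List.pySetD p rb ra) y) = rb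
              then h (pvG (PySem.List.pySetD p rb ra) y) + h ra + 1
              else h (pvG (PySem.List.pySetD p rb ra) y)) <
           (if pvRoot N p y = rb then h y + h ra + 1 else h y)
      rw [hget y hy0 hy]
      by_cases hyrb : y = rb
      · subst hyrb
        rw [if_pos rfl] at hney ⊢
        rw [hrra, hrrb, if_neg hne, if_pos rfl]
        omega
      · rw [if_neg hyrb] at hney ⊢
        have hd := hdec y hy0 hy hney
        have hsr : pvRoot N p (pvG p y) = pvRoot N p y :=
          (pvRoot_step N p h hwf2 y hy0 hy hney).symm
        rw [hsr]
        by_cases hc : pvRoot N p y = rb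
        · rw [if_pos hc, if_pos hc]; omega
        · rw [if_neg hc, if_neg hc]; omega
  refine ⟨hwf', ?_⟩
  have key : ∀ n (y : Int), h y = n → 0 ≤ y → y < (N:Int) →
      pvRoot N (PySem.List.pySetD p rb ra) y = if pvRoot N p y = rb then ra else pvRoot N p y := by
    intro n
    induction n using Nat.strong_induction_on with
    | _ n ih =>
      intro y hyn hy0 hy
      by_cases hyrb : y = rb
      · subst hyrb
        have hg : pvG (PySem.List.pySetD p y ra) y = ra := by
          rw [hget y hy0 hy]; simp
        have hstep' := pvRoot_step N _ _ hwf' y hy0 hy (by rw [hg]; omega)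
        rw [hstep', hg]
        have hfixra : pvG (PySem.List.pySetD p y ra) ra = ra := by
          rw [hget ra ha0 ha, if_neg hne]; exact hra
        rw [pvRoot_fix N _ ra hfixra]
        rw [hrrb]
        simp
      · by_cases hfixy : pvG p y = y
        · have hg : pvG (PySem.List.pySetD p rb ra) y = y := by
            rw [hget y hy0 hy, if_neg hyrb]; exact hfixy
          rw [pvRoot_fix N _ y hg, pvRoot_fix N p y hfixy]
          simp [hyrb]
        · have hg : pvG (PySem.List.pySetD p rb ra) y = pvG p y := by
            rw [hget y hy0 hy, if_neg hyrb]
          have hstep1 := pvRoot_step N _ _ hwf' y hy0 hy (by rw [hg]; exact hfixy)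
          have hstep2 := pvRoot_step N p h hwf2 y hy0 hy hfixy
          rw [hstep1, hg, hstep2]
          have hd := hdec y hy0 hy hfixy
          exact ih (h (pvG p y)) (by omega) (pvG p y) rfl (hcl y hy0 hy).1 (hcl y hy0 hy).2
  intro y hy0 hy
  exact key (h y) y rfl hy0 hy

-- ---- B relabel loop, pointwise ----
theorem pvFoldSet (w : Int) :
    ∀ (ms : List Int) (lab : List Int), (∀ x ∈ ms, 0 ≤ x ∧ x < (lab.length:Int)) →
      (ms.foldl (fun l x => PySem.List.pySetD l x w) lab).length = lab.length ∧
      ∀ y : Int, 0 ≤ y → y < (lab.length:Int) →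
        pvG (ms.foldl (fun l x => PySem.List.pySetD l x w) lab) y =
          if y ∈ ms then w else pvG lab y := by
  intro ms
  induction ms with
  | nil => intro lab hms; exact ⟨rfl, fun y _ _ => by simp⟩
  | cons a ms ih =>
    intro lab hms
    have ha := hms a (List.mem_cons_self)
    have hlen1 : (PySem.List.pySetD lab a w).length = lab.length :=
      PySem.List.length_pySetD lab a w
    obtain ⟨ih1, ih2⟩ := ih (PySem.List.pySetD lab a w)
      (by rw [hlen1]; exact fun x hx => hms x (List.mem_cons_of_mem a hx))
    constructor
    · simpa [hlen1] using ih1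
    · intro y hy0 hy
      simp only [List.foldl_cons]
      rw [ih2 y hy0 (by rw [hlen1]; exact hy)]
      rw [pvG_set lab a y w ha.1 ha.2 hy0 hy]
      by_cases hym : y ∈ ms
      · simp [hym]
      · by_cases hya : y = a
        · simp [hya, hym]
        · simp [hym, hya]

-- ---- dict erase keeps other keys ----
theorem pvGet?_erase_of_ne {ν : Type} (d : PySem.Dict Int ν) (k k' : Int) (h : k' ≠ k) :
    (d.erase k).get? k' = d.get? k' := by
  obtain ⟨items⟩ := d
  simp only [PySem.Dict.erase, PySem.Dict.get?]
  congr 1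
  induction items with
  | nil => rfl
  | cons a l ih =>
    by_cases hak : a.1 = k
    · have h1 : (a.1 == k) = true := by simp [hak]
      have h2 : (a.1 == k') = false := by simp [hak, Ne.symm h]
      simp [List.filter, List.find?, h1, h2, ih]
    · have h1 : (a.1 == k) = false := by simp [hak]
      by_cases hak' : a.1 = k'
      · have h2 : (a.1 == k') = true := by simp [hak']
        simp [List.filter, List.find?, h1, h2]
      · have h2 : (a.1 == k') = false := by simp [hak']
        simp [List.filter, List.find?, h1, h2, ih]

-- ---- the merged states satisfy the invariant (common core of the four swap cases) ----
theorem pvMergedInv (N : Nat) (parent size label : List Int) (members : PySem.Dict Int (List Int))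
    (inv : pvInv N parent size label members)
    (h : Int → Nat)
    (hdec : ∀ x : Int, 0 ≤ x → x < (N:Int) → pvG parent x ≠ x → h (pvG parent x) < h x)
    (hcnt : ∀ x : Int, 0 ≤ x → x < (N:Int) → h x + 1 ≤ label.count (pvG label x))
    (p2 : List Int) (hwf2 : pvWf N p2 h)
    (hrm : ∀ y : Int, 0 ≤ y → y < (N:Int) → pvRoot N p2 y = pvRoot N parent y)
    (hrt : ∀ y : Int, 0 ≤ y → y < (N:Int) → (pvG p2 y = y ↔ pvG parent y = y))
    (u v wa la wn ls : Int)
    (hu1 : 1 ≤ u) (hu : u < (N:Int)) (hv1 : 1 ≤ v) (hv : v < (N:Int))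
    (hwala : (wa = pvRoot N parent u ∧ la = pvRoot N parent v) ∨
             (wa = pvRoot N parent v ∧ la = pvRoot N parent u))
    (hwnls : (wn = pvG label u ∧ ls = pvG label v) ∨ (wn = pvG label v ∧ ls = pvG label u))
    (hne : pvRoot N parent u ≠ pvRoot N parent v) :
    pvInv N (PySem.List.pySetD p2 la wa)
      (PySem.List.pySetD size wa (pvG size wa + pvG size la))
      ((members.getD ls []).foldl (fun l x => PySem.List.pySetD l x wn) label)
      ((members.insert wn (members.getD wn [] ++ members.getD ls [])).erase ls) := by
  have hu0 : (0:Int) ≤ u := by omega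
  have hv0 : (0:Int) ≤ v := by omega
  have hwfp : pvWf N parent h := by
    refine ⟨inv.plen, inv.pcl, hdec, ?_⟩
    intro x hx0 hx
    have h1 := hcnt x hx0 hx
    have h2 : label.count (pvG label x) ≤ label.length := List.count_le_length
    have h3 := inv.llen
    omega
  obtain ⟨⟨hru0, hruN⟩, hruFix, _, _⟩ := pvRoot_spec N parent h hwfp _ u rfl hu0 hu
  obtain ⟨⟨hrv0, hrvN⟩, hrvFix, _, _⟩ := pvRoot_spec N parent h hwfp _ v rfl hv0 hv
  have hLuLv : pvG label u ≠ pvG label v := fun hc =>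
    hne ((inv.part u v hu0 hu hv0 hv).2 hc)
  have hwnne : wn ≠ ls := by
    rcases hwnls with ⟨h1, h2⟩ | ⟨h1, h2⟩ <;> subst h1 <;> subst h2
    · exact hLuLv
    · exact hLuLv.symm
  have hwane : wa ≠ la := by
    rcases hwala with ⟨h1, h2⟩ | ⟨h1, h2⟩ <;> subst h1 <;> subst h2
    · exact hne
    · exact hne.symm
  -- label of a root equals label of any member
  have hLR : ∀ x : Int, 0 ≤ x → x < (N:Int) →
      pvG label (pvRoot N parent x) = pvG label x := by
    intro x hx0 hx
    obtain ⟨⟨hr0, hrN⟩, _, _, _⟩ := pvRoot_spec N parent h hwfp _ x rfl hx0 hx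
    exact (inv.part (pvRoot N parent x) x hr0 hrN hx0 hx).1
      (pvRoot_root N parent h hwfp x hx0 hx)
  have hwa0 : (0:Int) ≤ wa ∧ wa < (N:Int) := by
    rcases hwala with ⟨h1, _⟩ | ⟨h1, _⟩ <;> subst h1 <;> exact ⟨by omega, by omega⟩
  have hla0 : (0:Int) ≤ la ∧ la < (N:Int) := by
    rcases hwala with ⟨_, h1⟩ | ⟨_, h1⟩ <;> subst h1 <;> exact ⟨by omega, by omega⟩
  have hwaFix : pvG parent wa = wa := by
    rcases hwala with ⟨h1, _⟩ | ⟨h1, _⟩ <;> subst h1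
    · exact hruFix
    · exact hrvFix
  have hlaFix : pvG parent la = la := by
    rcases hwala with ⟨_, h1⟩ | ⟨_, h1⟩ <;> subst h1
    · exact hrvFix
    · exact hruFix
  have hRwa : pvRoot N parent wa = wa := pvRoot_fix N parent wa hwaFix
  have hRla : pvRoot N parent la = la := pvRoot_fix N parent la hlaFix
  -- {label wa, label la} = {wn, ls}
  have hLpair : (pvG label wa = wn ∧ pvG label la = ls) ∨
      (pvG label wa = ls ∧ pvG label la = wn) := by
    rcases hwala with ⟨h1, h2⟩ | ⟨h1, h2⟩ <;> subst h1 <;> subst h2 <;>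
      rcases hwnls with ⟨h3, h4⟩ | ⟨h3, h4⟩ <;> subst h3 <;> subst h4
    · exact Or.inl ⟨hLR u hu0 hu, hLR v hv0 hv⟩
    · exact Or.inr ⟨hLR u hu0 hu, hLR v hv0 hv⟩
    · exact Or.inr ⟨hLR v hv0 hv, hLR u hu0 hu⟩
    · exact Or.inl ⟨hLR v hv0 hv, hLR u hu0 hu⟩
  -- bridge: being in wa's / la's tree is having wa's / la's label
  have hXwa : ∀ x : Int, 0 ≤ x → x < (N:Int) →
      (pvRoot N parent x = wa ↔ pvG label x = pvG label wa) := by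
    intro x hx0 hx
    have := inv.part x wa hx0 hx hwa0.1 hwa0.2
    rw [hRwa] at this
    exact this
  have hXla : ∀ x : Int, 0 ≤ x → x < (N:Int) →
      (pvRoot N parent x = la ↔ pvG label x = pvG label la) := by
    intro x hx0 hx
    have := inv.part x la hx0 hx hla0.1 hla0.2
    rw [hRla] at this
    exact this
  -- member lists
  have hlivels : ∃ x : Int, 0 ≤ x ∧ x < (N:Int) ∧ pvG label x = ls := by
    rcases hwnls with ⟨_, h1⟩ | ⟨_, h1⟩ <;> subst h1
    · exact ⟨v, hv0, hv, rfl⟩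
    · exact ⟨u, hu0, hu, rfl⟩
  have hlivewn : ∃ x : Int, 0 ≤ x ∧ x < (N:Int) ∧ pvG label x = wn := by
    rcases hwnls with ⟨h1, _⟩ | ⟨h1, _⟩ <;> subst h1
    · exact ⟨u, hu0, hu, rfl⟩
    · exact ⟨v, hv0, hv, rfl⟩
  obtain ⟨Ls, hLsget, hLsiff⟩ := inv.mem ls hlivels
  obtain ⟨Mwn, hMget, hMiff⟩ := inv.mem wn hlivewn
  have hgetDls : members.getD ls [] = Ls := by
    rw [PySem.Dict.getD_eq_get?_getD, hLsget]; rfl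
  have hgetDwn : members.getD wn [] = Mwn := by
    rw [PySem.Dict.getD_eq_get?_getD, hMget]; rfl
  rw [hgetDls, hgetDwn]
  -- the relabelled array, pointwise
  obtain ⟨hllen', hLfold⟩ := pvFoldSet wn Ls label
    (fun x hx => by have := (hLsiff x).1 hx; rw [inv.llen]; exact ⟨this.1, this.2.1⟩)
  have hLld : ∀ y : Int, 0 ≤ y → y < (N:Int) →
      pvG (Ls.foldl (fun l x => PySem.List.pySetD l x wn) label) y =
        if pvG label y = ls then wn else pvG label y := by
    intro y hy0 hy
    rw [hLfold y hy0 (by rw [inv.llen]; exact hy)]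
    by_cases hmem : y ∈ Ls
    · have := (hLsiff y).1 hmem
      rw [if_pos hmem, if_pos this.2.2]
    · rw [if_neg hmem, if_neg (fun hc => hmem ((hLsiff y).2 ⟨hy0, hy, hc⟩))]
  -- the relabelled array as a map
  have hmapN : Ls.foldl (fun l x => PySem.List.pySetD l x wn) label =
      label.map (fun t => if t = ls then wn else t) := by
    apply List.ext_getElem
    · rw [hllen', List.length_map]
    · intro k hk1 hk2
      have hkN : (k:Int) < (N:Int) := by
        rw [hllen', inv.llen] at hk1; exact_mod_cast hk1
      have h1 : pvG (Ls.foldl (fun l x => PySem.List.pySetD l x wn) label) (k:Int) =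
          (Ls.foldl (fun l x => PySem.List.pySetD l x wn) label)[k] :=
        pvG_natCast _ k hk1
      have h2 : pvG label (k:Int) = label[k] :=
        pvG_natCast _ k (by rw [hllen'] at hk1; exact hk1)
      rw [← h1, hLld (k:Int) (by omega) hkN, List.getElem_map, h2]
  have hcntwn : (Ls.foldl (fun l x => PySem.List.pySetD l x wn) label).count wn =
      label.count wn + label.count ls := by
    rw [hmapN]; exact pvCount_map_merge label wn ls hwnne
  have hcnto : ∀ c : Int, c ≠ wn → c ≠ ls →
      (Ls.foldl (fun l x => PySem.List.pySetD l x wn) label).count c = label.count c := by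
    intro c h1 h2
    rw [hmapN]; exact pvCount_map_other label wn ls c h1 h2
  -- roots of p2
  have hwaFix2 : pvG p2 wa = wa := (hrt wa hwa0.1 hwa0.2).2 hwaFix
  have hlaFix2 : pvG p2 la = la := (hrt la hla0.1 hla0.2).2 hlaFix
  -- fuel bound for the union rank
  have hbound : ∀ y : Int, 0 ≤ y → y < (N:Int) →
      (if pvRoot N p2 y = la then h y + h wa + 1 else h y) < N := by
    intro y hy0 hy
    rw [hrm y hy0 hy]
    by_cases hc : pvRoot N parent y = la
    · rw [if_pos hc]
      have h1 := hcnt y hy0 hy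
      have h2 := hcnt wa hwa0.1 hwa0.2
      have hLne : pvG label y ≠ pvG label wa := by
        intro he
        have := (hXwa y hy0 hy).2 he
        rw [this] at hc
        exact hwane hc
      have h3 := pvCount_two_le_length label (pvG label y) (pvG label wa) hLne
      have h4 := inv.llen
      omega
    · rw [if_neg hc]
      exact hwfp.2.2.2 y hy0 hy
  obtain ⟨hwfU, hRt'⟩ := pvUnion_root N p2 h hwf2 wa la hwa0.1 hwa0.2 hla0.1 hla0.2
    hwaFix2 hlaFix2 hwane hbound
  have hR' : ∀ y : Int, 0 ≤ y → y < (N:Int) →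
      pvRoot N (PySem.List.pySetD p2 la wa) y =
        if pvRoot N parent y = la then wa else pvRoot N parent y := by
    intro y hy0 hy
    rw [hRt' y hy0 hy, hrm y hy0 hy]
  refine ⟨hwfU.1, ?_, hllen'.trans inv.llen, hwfU.2.1, ?_, ?_, ?_, ?_, ?_, ?_, ?_⟩
  · rw [PySem.List.length_pySetD]; exact inv.slen
  -- wf with count bound
  · refine ⟨fun y => if pvRoot N p2 y = la then h y + h wa + 1 else h y, hwfU.2.2.1, ?_⟩
    intro y hy0 hy
    show (if pvRoot N p2 y = la then h y + h wa + 1 else h y) + 1 ≤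
      (Ls.foldl (fun l x => PySem.List.pySetD l x wn) label).count
        (pvG (Ls.foldl (fun l x => PySem.List.pySetD l x wn) label) y)
    rw [hLld y hy0 hy, hrm y hy0 hy]
    by_cases hc : pvRoot N parent y = la
    · rw [if_pos hc]
      have hLy : pvG label y = pvG label la := (hXla y hy0 hy).1 hc
      have h1 := hcnt y hy0 hy
      have h2 := hcnt wa hwa0.1 hwa0.2
      rcases hLpair with ⟨hp1, hp2⟩ | ⟨hp1, hp2⟩
      · rw [hLy, hp2, if_pos rfl, hcntwn]
        rw [hLy, hp2] at h1
        rw [hp1] at h2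
        omega
      · rw [hLy, hp2, if_neg hwnne, hcntwn]
        rw [hLy, hp2] at h1
        rw [hp1] at h2
        omega
    · rw [if_neg hc]
      have h1 := hcnt y hy0 hy
      by_cases hyls : pvG label y = ls
      · rw [if_pos hyls, hcntwn]
        rw [hyls] at h1
        omega
      · rw [if_neg hyls]
        by_cases hywn : pvG label y = wn
        · rw [hywn, hcntwn]
          rw [hywn] at h1
          omega
        · rw [hcnto _ hywn hyls]
          exact h1
  -- sizes
  · intro x hx0 hx hfix
    have hgx : pvG (PySem.List.pySetD p2 la wa) x = if x = la then wa else pvG p2 x := by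
      have := hwf2.1
      exact pvG_set p2 la x wa hla0.1 (by omega) hx0 (by omega)
    by_cases hxla : x = la
    · rw [hgx, if_pos hxla] at hfix
      exact absurd (hfix.trans hxla) hwane
    · rw [hgx, if_neg hxla] at hfix
      have hfixp : pvG parent x = x := (hrt x hx0 hx).1 hfix
      have hRx : pvRoot N parent x = x := pvRoot_fix N parent x hfixp
      have hgs : pvG (PySem.List.pySetD size wa (pvG size wa + pvG size la)) x =
          if x = wa then pvG size wa + pvG size la else pvG size x := by
        have := inv.slen
        exact pvG_set size wa x _ hwa0.1 (by omega) hx0 (by omega)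
      by_cases hxwa : x = wa
      · have hgs2 : pvG (PySem.List.pySetD size wa (pvG size wa + pvG size la)) wa =
            pvG size wa + pvG size la := by
          have := inv.slen
          rw [pvG_set size wa wa _ hwa0.1 (by omega) hwa0.1 (by omega), if_pos rfl]
        have hs1 := inv.sizes wa hwa0.1 hwa0.2 hwaFix
        have hs2 := inv.sizes la hla0.1 hla0.2 hlaFix
        rw [hxwa, hgs2, hLld wa hwa0.1 hwa0.2]
        rcases hLpair with ⟨hp1, hp2⟩ | ⟨hp1, hp2⟩
        · rw [hp1, if_neg hwnne, hcntwn]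
          rw [hp1] at hs1
          rw [hp2] at hs2
          push_cast
          omega
        · rw [hp1, if_pos rfl, hcntwn]
          rw [hp1] at hs1
          rw [hp2] at hs2
          push_cast
          omega
      · rw [hgs, if_neg hxwa]
        have hLnotu : pvG label x ≠ wn ∧ pvG label x ≠ ls := by
          constructor
          · intro hc
            rcases hLpair with ⟨hp1, _⟩ | ⟨_, hp2⟩
            · have := (hXwa x hx0 hx).2 (by rw [hc, hp1])
              rw [hRx] at this; exact hxwa this
            · have := (hXla x hx0 hx).2 (by rw [hc, hp2])
              rw [hRx] at this; exact hxla this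
          · intro hc
            rcases hLpair with ⟨_, hp2⟩ | ⟨hp1, _⟩
            · have := (hXla x hx0 hx).2 (by rw [hc, hp2])
              rw [hRx] at this; exact hxla this
            · have := (hXwa x hx0 hx).2 (by rw [hc, hp1])
              rw [hRx] at this; exact hxwa this
        rw [hLld x hx0 hx, if_neg hLnotu.2, hcnto _ hLnotu.1 hLnotu.2]
        exact inv.sizes x hx0 hx hfixp
  -- part
  · intro x y hx0 hx hy0 hy
    rw [hR' x hx0 hx, hR' y hy0 hy, hLld x hx0 hx, hLld y hy0 hy]
    have hpxy := inv.part x y hx0 hx hy0 hy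
    have hax := hXwa x hx0 hx
    have hay := hXwa y hy0 hy
    have hbx := hXla x hx0 hx
    have hby := hXla y hy0 hy
    have hAside : ((if pvRoot N parent x = la then wa else pvRoot N parent x) =
        (if pvRoot N parent y = la then wa else pvRoot N parent y)) ↔
        ((pvRoot N parent x = pvRoot N parent y) ∨
         ((pvRoot N parent x = wa ∨ pvRoot N parent x = la) ∧
          (pvRoot N parent y = wa ∨ pvRoot N parent y = la))) := by
      by_cases c1 : pvRoot N parent x = la <;> by_cases c2 : pvRoot N parent y = la
      · rw [if_pos c1, if_pos c2]
        constructor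
        · intro _; exact Or.inr ⟨Or.inr c1, Or.inr c2⟩
        · intro _; rfl
      · rw [if_pos c1, if_neg c2]
        constructor
        · intro hh; exact Or.inr ⟨Or.inr c1, Or.inl hh.symm⟩
        · rintro (hh | ⟨_, hy'⟩)
          · rw [c1] at hh; exact absurd hh.symm c2
          · rcases hy' with hy' | hy'
            · exact hy'.symm
            · exact absurd hy' c2
      · rw [if_neg c1, if_pos c2]
        constructor
        · intro hh; exact Or.inr ⟨Or.inl hh, Or.inr c2⟩
        · rintro (hh | ⟨hx', _⟩)
          · rw [c2] at hh; exact absurd hh c1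
          · rcases hx' with hx' | hx'
            · exact hx'
            · exact absurd hx' c1
      · rw [if_neg c1, if_neg c2]
        constructor
        · intro hh; exact Or.inl hh
        · rintro (hh | ⟨hx', hy'⟩)
          · exact hh
          · rcases hx' with hx' | hx'
            · rcases hy' with hy' | hy'
              · rw [hx', hy']
              · exact absurd hy' c2
            · exact absurd hx' c1
    have hBside : ((if pvG label x = ls then wn else pvG label x) =
        (if pvG label y = ls then wn else pvG label y)) ↔
        ((pvG label x = pvG label y) ∨
         ((pvG label x = wn ∨ pvG label x = ls) ∧
          (pvG label y = wn ∨ pvG label y = ls))) := by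
      by_cases c1 : pvG label x = ls <;> by_cases c2 : pvG label y = ls
      · rw [if_pos c1, if_pos c2]
        constructor
        · intro _; exact Or.inr ⟨Or.inr c1, Or.inr c2⟩
        · intro _; rfl
      · rw [if_pos c1, if_neg c2]
        constructor
        · intro hh; exact Or.inr ⟨Or.inr c1, Or.inl hh.symm⟩
        · rintro (hh | ⟨_, hy'⟩)
          · rw [c1] at hh; exact absurd hh.symm c2
          · rcases hy' with hy' | hy'
            · exact hy'.symm
            · exact absurd hy' c2
      · rw [if_neg c1, if_pos c2]
        constructor
        · intro hh; exact Or.inr ⟨Or.inl hh, Or.inr c2⟩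
        · rintro (hh | ⟨hx', _⟩)
          · rw [c2] at hh; exact absurd hh c1
          · rcases hx' with hx' | hx'
            · exact hx'
            · exact absurd hx' c1
      · rw [if_neg c1, if_neg c2]
        constructor
        · intro hh; exact Or.inl hh
        · rintro (hh | ⟨hx', hy'⟩)
          · exact hh
          · rcases hx' with hx' | hx'
            · rcases hy' with hy' | hy'
              · rw [hx', hy']
              · exact absurd hy' c2
            · exact absurd hx' c1
    rw [hAside, hBside]
    rcases hLpair with ⟨hp1, hp2⟩ | ⟨hp1, hp2⟩
    · rw [hp1] at hax hay
      rw [hp2] at hbx hby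
      rw [hpxy, hax, hay, hbx, hby]
    · rw [hp1] at hax hay
      rw [hp2] at hbx hby
      rw [hpxy, hax, hay, hbx, hby]
      constructor
      · rintro (hh | ⟨hx', hy'⟩)
        · exact Or.inl hh
        · exact Or.inr ⟨hx'.symm, hy'.symm⟩
      · rintro (hh | ⟨hx', hy'⟩)
        · exact Or.inl hh
        · exact Or.inr ⟨hx'.symm, hy'.symm⟩
  -- lrange
  · intro x hx0 hx
    rw [hLld x hx0 hx]
    by_cases hc : pvG label x = ls
    · rw [if_pos hc]
      rcases hwnls with ⟨h1, _⟩ | ⟨h1, _⟩ <;> subst h1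
      · exact inv.lrange u hu0 hu
      · exact inv.lrange v hv0 hv
    · rw [if_neg hc]
      exact inv.lrange x hx0 hx
  -- lpos
  · intro x hx1 hx
    rw [hLld x (by omega) hx]
    by_cases hc : pvG label x = ls
    · rw [if_pos hc]
      rcases hwnls with ⟨h1, _⟩ | ⟨h1, _⟩ <;> subst h1
      · exact inv.lpos u hu1 hu
      · exact inv.lpos v hv1 hv
    · rw [if_neg hc]
      exact inv.lpos x hx1 hx
  -- lzero
  · intro hN
    have hz := inv.lzero hN
    have hls1 : 1 ≤ ls := by
      rcases hwnls with ⟨_, h1⟩ | ⟨_, h1⟩ <;> subst h1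
      · exact inv.lpos v hv1 hv
      · exact inv.lpos u hu1 hu
    rw [hLld 0 (by omega) (by exact_mod_cast hN), hz, if_neg (by omega)]
  -- mem
  · intro l hlive
    obtain ⟨x0, hx00, hx0N, hx0l⟩ := hlive
    rw [hLld x0 hx00 hx0N] at hx0l
    have hlnels : l ≠ ls := by
      by_cases hc : pvG label x0 = ls
      · rw [if_pos hc] at hx0l; exact hx0l ▸ hwnne
      · rw [if_neg hc] at hx0l; exact hx0l ▸ hc
    by_cases hlwn : l = wn
    · rw [hlwn]
      refine ⟨Mwn ++ Ls, ?_, ?_⟩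
      · rw [pvGet?_erase_of_ne _ ls wn hwnne]
        exact PySem.Dict.get?_insert_self _ _ _
      · intro x
        constructor
        · intro hx
          rcases List.mem_append.1 hx with hx | hx
          · obtain ⟨h1, h2, h3⟩ := (hMiff x).1 hx
            refine ⟨h1, h2, ?_⟩
            rw [hLld x h1 h2, if_neg (by rw [h3]; exact hwnne), h3]
          · obtain ⟨h1, h2, h3⟩ := (hLsiff x).1 hx
            refine ⟨h1, h2, ?_⟩
            rw [hLld x h1 h2, if_pos h3]
        · intro ⟨h1, h2, h3⟩
          rw [hLld x h1 h2] at h3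
          by_cases hc : pvG label x = ls
          · exact List.mem_append.2 (Or.inr ((hLsiff x).2 ⟨h1, h2, hc⟩))
          · rw [if_neg hc] at h3
            exact List.mem_append.2 (Or.inl ((hMiff x).2 ⟨h1, h2, h3⟩))
    · have hlive' : ∃ x : Int, 0 ≤ x ∧ x < (N:Int) ∧ pvG label x = l := by
        refine ⟨x0, hx00, hx0N, ?_⟩
        by_cases hc : pvG label x0 = ls
        · rw [if_pos hc] at hx0l; exact absurd hx0l.symm hlwn
        · rw [if_neg hc] at hx0l; exact hx0l
      obtain ⟨L0, hL0get, hL0iff⟩ := inv.mem l hlive'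
      refine ⟨L0, ?_, ?_⟩
      · rw [pvGet?_erase_of_ne _ ls l hlnels, PySem.Dict.get?_insert_of_ne _ _ hlwn]
        exact hL0get
      · intro x
        rw [hL0iff x]
        constructor
        · intro ⟨h1, h2, h3⟩
          refine ⟨h1, h2, ?_⟩
          rw [hLld x h1 h2, if_neg (by rw [h3]; exact hlnels), h3]
        · intro ⟨h1, h2, h3⟩
          rw [hLld x h1 h2] at h3
          by_cases hc : pvG label x = ls
          · rw [if_pos hc] at h3; exact absurd h3.symm hlwn
          · rw [if_neg hc] at h3; exact ⟨h1, h2, h3⟩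

-- ---- the per-edge simulation step ----
theorem pvStep (N : Nat) (parent size label : List Int) (members : PySem.Dict Int (List Int))
    (inv : pvInv N parent size label members) (u v : Int)
    (hu1 : 1 ≤ u) (hu : u < (N:Int)) (hv1 : 1 ≤ v) (hv : v < (N:Int)) :
    pvInv N (pvUnionA N (parent, size) u v).1 (pvUnionA N (parent, size) u v).2
      (pvMergeB (label, members) u v).1 (pvMergeB (label, members) u v).2 := by
  obtain ⟨h, hdec, hcnt⟩ := inv.wf
  have hu0 : (0:Int) ≤ u := by omega
  have hv0 : (0:Int) ≤ v := by omega
  have hwfp : pvWf N parent h := by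
    refine ⟨inv.plen, inv.pcl, hdec, ?_⟩
    intro x hx0 hx
    have h1 := hcnt x hx0 hx
    have h2 : label.count (pvG label x) ≤ label.length := List.count_le_length
    have h3 := inv.llen
    omega
  obtain ⟨ha1, hwf1, hrm1, hrt1⟩ :=
    pvFind_spec N h N parent u hwfp hu0 hu (hwfp.2.2.2 u hu0 hu)
  obtain ⟨hb1, hwf2', hrm2, hrt2⟩ :=
    pvFind_spec N h N (pvFindA N parent u).2 v hwf1 hv0 hv (hwfp.2.2.2 v hv0 hv)
  have hb1' : (pvFindA N (pvFindA N parent u).2 v).1 = pvRoot N parent v := by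
    rw [hb1, hrm1 v hv0 hv]
  have hrm2' : ∀ y : Int, 0 ≤ y → y < (N:Int) →
      pvRoot N (pvFindA N (pvFindA N parent u).2 v).2 y = pvRoot N parent y := by
    intro y hy0 hy
    rw [hrm2 y hy0 hy, hrm1 y hy0 hy]
  have hrt2' : ∀ y : Int, 0 ≤ y → y < (N:Int) →
      (pvG (pvFindA N (pvFindA N parent u).2 v).2 y = y ↔ pvG parent y = y) := by
    intro y hy0 hy
    exact (hrt2 y hy0 hy).trans (hrt1 y hy0 hy)
  by_cases hEq : pvRoot N parent u = pvRoot N parent v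
  · have hLeq : pvG label u = pvG label v := (inv.part u v hu0 hu hv0 hv).1 hEq
    have hUA : pvUnionA N (parent, size) u v = ((pvFindA N (pvFindA N parent u).2 v).2, size) := by
      simp only [pvUnionA]
      rw [ha1, hb1', if_neg (not_not_intro hEq)]
    have hLeq' : PySem.List.pyGetD label u 0 = PySem.List.pyGetD label v 0 := hLeq
    have hMB : pvMergeB (label, members) u v = (label, members) := by
      simp only [pvMergeB]
      rw [if_neg (not_not_intro hLeq')]
    rw [hUA, hMB]
    refine ⟨hwf2'.1, inv.slen, inv.llen, hwf2'.2.1, ⟨h, hwf2'.2.2.1, hcnt⟩, ?_, ?_,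
      inv.lrange, inv.lpos, inv.lzero, inv.mem⟩
    · intro x hx0 hx hfix
      exact inv.sizes x hx0 hx ((hrt2' x hx0 hx).1 hfix)
    · intro x y hx0 hx hy0 hy
      rw [hrm2' x hx0 hx, hrm2' y hy0 hy]
      exact inv.part x y hx0 hx hy0 hy
  · have hLne : pvG label u ≠ pvG label v := fun hc => hEq ((inv.part u v hu0 hu hv0 hv).2 hc)
    have hLne' : PySem.List.pyGetD label u 0 ≠ PySem.List.pyGetD label v 0 := hLne
    by_cases hsw : PySem.List.pyGetD size (pvRoot N parent u) 0 < PySem.List.pyGetD size (pvRoot N parent v) 0 <;>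
      by_cases hswB : (members.getD (PySem.List.pyGetD label u 0) []).length < (members.getD (PySem.List.pyGetD label v 0) []).length
    · have hUA : pvUnionA N (parent, size) u v =
          (PySem.List.pySetD (pvFindA N (pvFindA N parent u).2 v).2 (pvRoot N parent u) (pvRoot N parent v),
           PySem.List.pySetD size (pvRoot N parent v)
             (pvG size (pvRoot N parent v) + pvG size (pvRoot N parent u))) := by
        simp only [pvUnionA]
        rw [ha1, hb1', if_pos hEq, if_pos hsw]
        rfl
      have hMB : pvMergeB (label, members) u v =
          ((members.getD (pvG label u) []).foldl
             (fun l x => PySem.List.pySetD l x (pvG label v)) label,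
           (members.insert (pvG label v)
             (members.getD (pvG label v) [] ++ members.getD (pvG label u) [])).erase (pvG label u)) := by
        simp only [pvMergeB]
        rw [if_pos hLne', if_pos hswB]
        rfl
      rw [hUA, hMB]
      exact pvMergedInv N parent size label members inv h hdec hcnt _ hwf2' hrm2' hrt2'
        u v _ _ _ _ hu1 hu hv1 hv (Or.inr ⟨rfl, rfl⟩) (Or.inr ⟨rfl, rfl⟩) hEq
    · have hUA : pvUnionA N (parent, size) u v =
          (PySem.List.pySetD (pvFindA N (pvFindA N parent u).2 v).2 (pvRoot N parent u) (pvRoot N parent v),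
           PySem.List.pySetD size (pvRoot N parent v)
             (pvG size (pvRoot N parent v) + pvG size (pvRoot N parent u))) := by
        simp only [pvUnionA]
        rw [ha1, hb1', if_pos hEq, if_pos hsw]
        rfl
      have hMB : pvMergeB (label, members) u v =
          ((members.getD (pvG label v) []).foldl
             (fun l x => PySem.List.pySetD l x (pvG label u)) label,
           (members.insert (pvG label u)
             (members.getD (pvG label u) [] ++ members.getD (pvG label v) [])).erase (pvG label v)) := by
        simp only [pvMergeB]
        rw [if_pos hLne', if_neg hswB]
        rfl
      rw [hUA, hMB]
      exact pvMergedInv N parent size label members inv h hdec hcnt _ hwf2' hrm2' hrt2'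
        u v _ _ _ _ hu1 hu hv1 hv (Or.inr ⟨rfl, rfl⟩) (Or.inl ⟨rfl, rfl⟩) hEq
    · have hUA : pvUnionA N (parent, size) u v =
          (PySem.List.pySetD (pvFindA N (pvFindA N parent u).2 v).2 (pvRoot N parent v) (pvRoot N parent u),
           PySem.List.pySetD size (pvRoot N parent u)
             (pvG size (pvRoot N parent u) + pvG size (pvRoot N parent v))) := by
        simp only [pvUnionA]
        rw [ha1, hb1', if_pos hEq, if_neg hsw]
        rfl
      have hMB : pvMergeB (label, members) u v =
          ((members.getD (pvG label u) []).foldl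
             (fun l x => PySem.List.pySetD l x (pvG label v)) label,
           (members.insert (pvG label v)
             (members.getD (pvG label v) [] ++ members.getD (pvG label u) [])).erase (pvG label u)) := by
        simp only [pvMergeB]
        rw [if_pos hLne', if_pos hswB]
        rfl
      rw [hUA, hMB]
      exact pvMergedInv N parent size label members inv h hdec hcnt _ hwf2' hrm2' hrt2'
        u v _ _ _ _ hu1 hu hv1 hv (Or.inl ⟨rfl, rfl⟩) (Or.inr ⟨rfl, rfl⟩) hEq
    · have hUA : pvUnionA N (parent, size) u v =
          (PySem.List.pySetD (pvFindA N (pvFindA N parent u).2 v).2 (pvRoot N parent v) (pvRoot N parent u),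
           PySem.List.pySetD size (pvRoot N parent u)
             (pvG size (pvRoot N parent u) + pvG size (pvRoot N parent v))) := by
        simp only [pvUnionA]
        rw [ha1, hb1', if_pos hEq, if_neg hsw]
        rfl
      have hMB : pvMergeB (label, members) u v =
          ((members.getD (pvG label v) []).foldl
             (fun l x => PySem.List.pySetD l x (pvG label u)) label,
           (members.insert (pvG label u)
             (members.getD (pvG label u) [] ++ members.getD (pvG label v) [])).erase (pvG label v)) := by
        simp only [pvMergeB]
        rw [if_pos hLne', if_neg hswB]
        rfl
      rw [hUA, hMB]
      exact pvMergedInv N parent size label members inv h hdec hcnt _ hwf2' hrm2' hrt2'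
        u v _ _ _ _ hu1 hu hv1 hv (Or.inl ⟨rfl, rfl⟩) (Or.inl ⟨rfl, rfl⟩) hEq

-- ---- the step with wraparound endpoints normalized to slots 1..N-1 ----
theorem pvStepN (N : Nat) (parent size label : List Int) (members : PySem.Dict Int (List Int))
    (inv : pvInv N parent size label members) (u v : Int)
    (hu : (1 ≤ u ∧ u < (N:Int)) ∨ (1 - (N:Int) ≤ u ∧ u ≤ -1))
    (hv : (1 ≤ v ∧ v < (N:Int)) ∨ (1 - (N:Int) ≤ v ∧ v ≤ -1)) :
    pvInv N (pvUnionA N (parent, size) u v).1 (pvUnionA N (parent, size) u v).2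
      (pvMergeB (label, members) u v).1 (pvMergeB (label, members) u v).2 := by
  obtain ⟨h, hdec, hcnt⟩ := inv.wf
  have hwfp : pvWf N parent h := by
    refine ⟨inv.plen, inv.pcl, hdec, ?_⟩
    intro x hx0 hx
    have h1 := hcnt x hx0 hx
    have h2 : label.count (pvG label x) ≤ label.length := List.count_le_length
    have h3 := inv.llen
    omega
  have hplen := inv.plen
  have hllen := inv.llen
  have hu' : 1 ≤ (if u < 0 then u + (N:Int) else u) ∧ (if u < 0 then u + (N:Int) else u) < (N:Int) := by
    by_cases hneg : u < 0 <;> simp only [hneg, if_true, if_false] <;> omega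
  have hv' : 1 ≤ (if v < 0 then v + (N:Int) else v) ∧ (if v < 0 then v + (N:Int) else v) < (N:Int) := by
    by_cases hneg : v < 0 <;> simp only [hneg, if_true, if_false] <;> omega
  have hfa : pvFindA N parent u = pvFindA N parent (if u < 0 then u + (N:Int) else u) := by
    by_cases hneg : u < 0
    · rw [if_pos hneg]
      have hN2 : 2 ≤ N := by omega
      have h0 : -(parent.length:Int) ≤ u := by rw [hplen]; omega
      have hcl : 0 ≤ pvG parent (u + parent.length) ∧
          pvG parent (u + parent.length) < (parent.length:Int) := by
        rw [hplen]
        exact inv.pcl (u + N) (by omega) (by omega)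
      have hw := pvFindA_wrap parent u h0 hneg hcl N (by omega)
      rw [hplen] at hw
      exact hw
    · rw [if_neg hneg]
  obtain ⟨_, hwf1, _, _⟩ := pvFind_spec N h N parent (if u < 0 then u + (N:Int) else u)
    hwfp (by omega) hu'.2 (hwfp.2.2.2 _ (by omega) hu'.2)
  have hfb : pvFindA N (pvFindA N parent (if u < 0 then u + (N:Int) else u)).2 v =
      pvFindA N (pvFindA N parent (if u < 0 then u + (N:Int) else u)).2
        (if v < 0 then v + (N:Int) else v) := by
    by_cases hneg : v < 0
    · rw [if_pos hneg]
      have hlen1 := hwf1.1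
      have h0 : -((pvFindA N parent (if u < 0 then u + (N:Int) else u)).2.length:Int) ≤ v := by
        rw [hlen1]; omega
      have hcl : 0 ≤ pvG (pvFindA N parent (if u < 0 then u + (N:Int) else u)).2
            (v + (pvFindA N parent (if u < 0 then u + (N:Int) else u)).2.length) ∧
          pvG (pvFindA N parent (if u < 0 then u + (N:Int) else u)).2
            (v + (pvFindA N parent (if u < 0 then u + (N:Int) else u)).2.length) <
          ((pvFindA N parent (if u < 0 then u + (N:Int) else u)).2.length:Int) := by
        rw [hlen1]
        exact hwf1.2.1 (v + N) (by omega) (by omega)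
      have hw := pvFindA_wrap (pvFindA N parent (if u < 0 then u + (N:Int) else u)).2
        v h0 hneg hcl N (by omega)
      rw [hlen1] at hw
      exact hw
    · rw [if_neg hneg]
  have hUA : pvUnionA N (parent, size) u v =
      pvUnionA N (parent, size) (if u < 0 then u + (N:Int) else u) (if v < 0 then v + (N:Int) else v) := by
    simp only [pvUnionA]
    rw [hfa, hfb]
  have hgu : PySem.List.pyGetD label u 0 =
      PySem.List.pyGetD label (if u < 0 then u + (N:Int) else u) 0 := by
    by_cases hneg : u < 0
    · rw [if_pos hneg]
      have := pvG_wrapneg label u (by rw [hllen]; omega) hneg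
      rw [hllen] at this
      exact this
    · rw [if_neg hneg]
  have hgv : PySem.List.pyGetD label v 0 =
      PySem.List.pyGetD label (if v < 0 then v + (N:Int) else v) 0 := by
    by_cases hneg : v < 0
    · rw [if_pos hneg]
      have := pvG_wrapneg label v (by rw [hllen]; omega) hneg
      rw [hllen] at this
      exact this
    · rw [if_neg hneg]
  have hMB : pvMergeB (label, members) u v =
      pvMergeB (label, members) (if u < 0 then u + (N:Int) else u) (if v < 0 then v + (N:Int) else v) := by
    simp only [pvMergeB]
    rw [hgu, hgv]
  rw [hUA, hMB]
  exact pvStep N parent size label members inv _ _ hu'.1 hu'.2 hv'.1 hv'.2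

-- ---- folding all edges ----
theorem pvFold (N : Nat) (E : List (Int × Int))
    (hE : ∀ e ∈ E, ((1 ≤ e.1 ∧ e.1 < (N:Int)) ∨ (1 - (N:Int) ≤ e.1 ∧ e.1 ≤ -1)) ∧
      ((1 ≤ e.2 ∧ e.2 < (N:Int)) ∨ (1 - (N:Int) ≤ e.2 ∧ e.2 ≤ -1))) :
    ∀ (parent size label : List Int) (members : PySem.Dict Int (List Int)),
      pvInv N parent size label members →
      pvInv N (E.foldl (fun ps uv => pvUnionA N ps uv.1 uv.2) (parent, size)).1
              (E.foldl (fun ps uv => pvUnionA N ps uv.1 uv.2) (parent, size)).2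
              (E.foldl (fun st uv => pvMergeB st uv.1 uv.2) (label, members)).1
              (E.foldl (fun st uv => pvMergeB st uv.1 uv.2) (label, members)).2 := by
  revert hE
  induction E with
  | nil =>
    intro hE parent size label members hinv
    exact hinv
  | cons e E ih =>
    intro hE parent size label members hinv
    have he := hE e List.mem_cons_self
    have hstep := pvStepN N parent size label members hinv e.1 e.2 he.1 he.2
    simp only [List.foldl_cons]
    exact ih (fun e' he' => hE e' (List.mem_cons_of_mem e he')) _ _ _ _ hstep

-- ---- the initial states satisfy the invariant ----
theorem pvInit (b : Int) :
    pvInv b.toNat (PySem.List.pyRange 0 b 1) (List.replicate b.toNat (1:Int))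
      (PySem.List.pyRange 0 b 1)
      ((PySem.List.pyRange 0 b 1).foldl (fun d i => d.insert i [i]) PySem.Dict.empty) := by
  have hid : ∀ x : Int, 0 ≤ x → x < ((b.toNat:Nat):Int) →
      pvG (PySem.List.pyRange 0 b 1) x = x := by
    intro x hx0 hx
    exact pvG_range b x hx0 (by omega)
  refine ⟨pvLen_range b, by simp, pvLen_range b, ?_, ?_, ?_, ?_, ?_, ?_, ?_, ?_⟩
  · intro x hx0 hx
    rw [hid x hx0 hx]
    exact ⟨hx0, hx⟩
  · refine ⟨fun _ => 0, ?_, ?_⟩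
    · intro x hx0 hx hne
      rw [hid x hx0 hx] at hne
      exact absurd rfl hne
    · intro x hx0 hx
      rw [hid x hx0 hx, pvCount_range b x hx0 (by omega)]
  · intro x hx0 hx _
    rw [pvG_replicate b.toNat x hx0 hx, hid x hx0 hx, pvCount_range b x hx0 (by omega)]
    simp
  · intro x y hx0 hx hy0 hy
    rw [pvRoot_fix _ _ x (hid x hx0 hx), pvRoot_fix _ _ y (hid y hy0 hy),
      hid x hx0 hx, hid y hy0 hy]
  · intro x hx0 hx
    rw [hid x hx0 hx]
    exact ⟨hx0, hx⟩
  · intro x hx1 hx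
    rw [hid x (by omega) hx]
    exact hx1
  · intro hN
    exact hid 0 (by omega) (by exact_mod_cast hN)
  · intro l hlive
    obtain ⟨x0, hx00, hx0N, hx0l⟩ := hlive
    rw [hid x0 hx00 hx0N] at hx0l
    rw [← hx0l]
    have hmem : x0 ∈ PySem.List.pyRange 0 b 1 := PySem.List.mem_pyRange_one.2 ⟨hx00, by omega⟩
    have hitems : ((PySem.List.pyRange 0 b 1).foldl (fun d i => d.insert i [i])
        PySem.Dict.empty).items = PySem.Dict.empty.items ++
          (PySem.List.pyRange 0 b 1).map (fun i => (i, [i])) := by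
      refine PySem.Dict.items_foldl_insert_fresh (PySem.List.pyRange 0 b 1)
        (fun i => i) (fun i => [i]) PySem.Dict.empty (fun a _ => ?_) ?_
      · exact PySem.Dict.contains_empty a
      · simpa using PySem.List.nodup_pyRange_one 0 b
    have hkeys : ((PySem.List.pyRange 0 b 1).foldl (fun d i => d.insert i [i])
        PySem.Dict.empty).keys.Nodup := by
      refine PySem.Dict.nodup_keys_foldl_insert _ _ _ ?_
      simp [PySem.Dict.keys_empty]
    refine ⟨[x0], ?_, ?_⟩
    · refine PySem.Dict.get?_of_mem_items _ ?_ hkeys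
      rw [hitems]
      simp only [List.mem_append, List.mem_map]
      exact Or.inr ⟨x0, hmem, rfl⟩
    · intro x
      simp only [List.mem_singleton]
      constructor
      · intro hx
        rw [hx]
        exact ⟨hx00, hx0N, hid x0 hx00 hx0N⟩
      · intro ⟨h1, h2, h3⟩
        rw [hid x h1 h2] at h3
        exact h3

-- ---- first-occurrence answer accumulator (specification of both final loops) ----
def pvAnsSpec (label : List Int) : List Int → PySem.Set Int → Int → Int
  | [], _, ans => ans
  | i :: P, S, ans =>
    if PySem.Set.contains S (pvG label i) then pvAnsSpec label P S ans
    else pvAnsSpec label P (PySem.Set.add S (pvG label i))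
      (ans + pvCeilSqrt ((label.count (pvG label i) : Int)))

theorem pvFilter_discard (c : Int) (g : Int → Bool) (hgc : g c = false) :
    ∀ X : List Int, (PySem.Set.discard X c).filter g = X.filter g := by
  intro X
  induction X with
  | nil => rfl
  | cons x X ih =>
    simp only [PySem.Set.discard, List.filter_cons] at ih ⊢
    by_cases hxc : x = c
    · have h2 : (!(x == c)) = false := by simp [hxc]
      have h3 : g x = false := by rw [hxc]; exact hgc
      simp only [h2, h3, Bool.false_eq_true, if_false]
      exact ih
    · have h2 : (!(x == c)) = true := by simp [hxc]
      simp only [h2, if_true]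
      rw [List.filter_cons]
      cases hgx : g x
      · simp only [Bool.false_eq_true, if_false]
        exact ih
      · simp only [if_true]
        rw [ih]

theorem pvFilter_add (c : Int) (S : PySem.Set Int) :
    ∀ X : List Int,
      X.filter (fun lb => !(PySem.Set.contains (PySem.Set.add S c) lb)) =
        (PySem.Set.discard X c).filter (fun lb => !(PySem.Set.contains S lb)) := by
  intro X
  induction X with
  | nil => rfl
  | cons x X ih =>
    have hco : ∀ y : Int, PySem.Set.contains (PySem.Set.add S c) y = true ↔ (y ∈ S ∨ y = c) := by
      intro y
      rw [PySem.Set.contains_iff, PySem.Set.mem_add]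
    simp only [PySem.Set.discard, List.filter_cons] at ih ⊢
    by_cases hxc : x = c
    · have h1 : (!(PySem.Set.contains (PySem.Set.add S c) x)) = false := by
        simp [hco x, hxc]
      have h2 : (!(x == c)) = false := by simp [hxc]
      simp only [h1, h2, Bool.false_eq_true, if_false]
      exact ih
    · have h2 : (!(x == c)) = true := by simp [hxc]
      have h1 : (!(PySem.Set.contains (PySem.Set.add S c) x)) = (!(PySem.Set.contains S x)) := by
        by_cases hxS : x ∈ S
        · have ha : PySem.Set.contains (PySem.Set.add S c) x = true := (hco x).2 (Or.inl hxS)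
          have hb : PySem.Set.contains S x = true := (PySem.Set.contains_iff S x).2 hxS
          rw [ha, hb]
        · have ha : PySem.Set.contains (PySem.Set.add S c) x = false := by
            rw [← Bool.not_eq_true]
            intro hcc
            rcases (hco x).1 hcc with hcc | hcc
            · exact hxS hcc
            · exact hxc hcc
          have hb : PySem.Set.contains S x = false := by
            rw [← Bool.not_eq_true]
            intro hcc
            exact hxS ((PySem.Set.contains_iff S x).1 hcc)
          rw [ha, hb]
      simp only [h2, if_true]
      rw [List.filter_cons, h1, ih]

theorem pvAnsSpec_eq (label : List Int) :
    ∀ (P : List Int) (S : PySem.Set Int) (ans : Int),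
      pvAnsSpec label P S ans = ans +
        (((PySem.Set.ofList (P.map (pvG label))).filter
            (fun lb => !(PySem.Set.contains S lb))).map
          (fun lb => pvCeilSqrt ((label.count lb : Int)))).sum := by
  intro P
  induction P with
  | nil =>
    intro S ans
    simp [pvAnsSpec, PySem.Set.ofList]
  | cons i P ih =>
    intro S ans
    simp only [pvAnsSpec, List.map_cons]
    rw [PySem.Set.ofList_cons, List.filter_cons]
    by_cases hc : PySem.Set.contains S (pvG label i) = true
    · rw [if_pos hc]
      have hg : (!(PySem.Set.contains S (pvG label i))) = false := by rw [hc]; rfl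
      simp only [hg, Bool.false_eq_true, if_false]
      rw [ih S ans, pvFilter_discard (pvG label i) _ hg]
    · rw [if_neg hc]
      have hcf : PySem.Set.contains S (pvG label i) = false := by
        rw [← Bool.not_eq_true]; exact hc
      have hg : (!(PySem.Set.contains S (pvG label i))) = true := by rw [hcf]; rfl
      simp only [hg, if_true]
      rw [ih (PySem.Set.add S (pvG label i)) _, ← pvFilter_add (pvG label i) S]
      simp only [List.map_cons, List.sum_cons]
      ring

-- ---- the A final loop equals the accumulator ----
theorem pvLoopA (N : Nat) (parent size label : List Int) (members : PySem.Dict Int (List Int))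
    (inv : pvInv N parent size label members) (h : Int → Nat)
    (hwfp0 : pvWf N parent h) :
    ∀ P : List Int, (∀ i ∈ P, 0 ≤ i ∧ i < (N:Int)) →
    ∀ (par : List Int) (vis : PySem.Set Int) (ans : Int) (S : PySem.Set Int),
      pvWf N par h →
      (∀ y : Int, 0 ≤ y → y < (N:Int) → pvRoot N par y = pvRoot N parent y) →
      (∀ i : Int, 0 ≤ i → i < (N:Int) → (pvRoot N parent i ∈ vis ↔ pvG label i ∈ S)) →
      (P.foldl (fun st i =>
        let fr := pvFindA N st.1 i
        if ¬ (PySem.Set.contains st.2.1 fr.1) then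
          (fr.2, PySem.Set.add st.2.1 fr.1, st.2.2 + pvCeilSqrt (pvG size fr.1))
        else (fr.2, st.2.1, st.2.2)) (par, vis, ans)).2.2 = pvAnsSpec label P S ans := by
  intro P
  induction P with
  | nil =>
    intro _ par vis ans S _ _ _
    rfl
  | cons i P ih =>
    intro hP par vis ans S hwfpar hrmpar hcorr
    have hi := hP i List.mem_cons_self
    obtain ⟨hf1, hf2, hf3, hf4⟩ :=
      pvFind_spec N h N par i hwfpar hi.1 hi.2 (hwfpar.2.2.2 i hi.1 hi.2)
    have hfr : (pvFindA N par i).1 = pvRoot N parent i := by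
      rw [hf1, hrmpar i hi.1 hi.2]
    have hrmpar' : ∀ y : Int, 0 ≤ y → y < (N:Int) →
        pvRoot N (pvFindA N par i).2 y = pvRoot N parent y := by
      intro y hy0 hy
      rw [hf3 y hy0 hy, hrmpar y hy0 hy]
    simp only [List.foldl_cons, pvAnsSpec]
    by_cases hmem : pvG label i ∈ S
    · have hvis : pvRoot N parent i ∈ vis := (hcorr i hi.1 hi.2).2 hmem
      rw [if_neg (by rw [hfr]; exact not_not_intro ((PySem.Set.contains_iff vis _).2 hvis)),
        if_pos ((PySem.Set.contains_iff S _).2 hmem)]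
      exact ih (fun j hj => hP j (List.mem_cons_of_mem i hj)) _ vis ans S hf2 hrmpar' hcorr
    · have hvis : pvRoot N parent i ∉ vis := fun hc => hmem ((hcorr i hi.1 hi.2).1 hc)
      have hcS : ¬ PySem.Set.contains S (pvG label i) = true := by
        rw [PySem.Set.contains_iff]; exact hmem
      rw [if_pos (by rw [hfr]; rw [PySem.Set.contains_iff]; exact hvis), if_neg hcS]
      -- the size at the root is the class count
      obtain ⟨⟨hr0, hrN⟩, hrfix, _, _⟩ := pvRoot_spec N parent h hwfp0 _ i rfl hi.1 hi.2
      have hLri : pvG label (pvRoot N parent i) = pvG label i :=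
        (inv.part (pvRoot N parent i) i hr0 hrN hi.1 hi.2).1
          (pvRoot_root N parent h hwfp0 i hi.1 hi.2)
      have hsz : pvG size (pvRoot N parent i) = ((label.count (pvG label i) : Nat) : Int) := by
        rw [inv.sizes (pvRoot N parent i) hr0 hrN hrfix, hLri]
      rw [hfr, hsz]
      refine ih (fun j hj => hP j (List.mem_cons_of_mem i hj)) _ _ _ _ hf2 hrmpar' ?_
      intro j hj0 hj
      rw [PySem.Set.mem_add, PySem.Set.mem_add]
      constructor
      · rintro (hc | hc)
        · exact Or.inl ((hcorr j hj0 hj).1 hc)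
        · exact Or.inr ((inv.part j i hj0 hj hi.1 hi.2).1 hc)
      · rintro (hc | hc)
        · exact Or.inl ((hcorr j hj0 hj).2 hc)
        · exact Or.inr ((inv.part j i hj0 hj hi.1 hi.2).2 hc)

-- ---- A's answer loop computes the sum over first-occurrence labels ----
theorem pvFinalA (N : Nat) (p s l : List Int) (m : PySem.Dict Int (List Int))
    (inv : pvInv N p s l m) (b : Int) (hb : b.toNat = N) :
    ((PySem.List.pyRange 1 b 1).foldl
      (fun st i =>
        let fr := pvFindA N st.1 i
        if ¬ (PySem.Set.contains st.2.1 fr.1) then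
          (fr.2, PySem.Set.add st.2.1 fr.1, st.2.2 + pvCeilSqrt (pvG s fr.1))
        else (fr.2, st.2.1, st.2.2))
      (p, (PySem.Set.empty : PySem.Set Int), (0 : Int))).2.2 =
    ((PySem.Set.ofList ((PySem.List.pyRange 1 b 1).map (pvG l))).map
      (fun lb => pvCeilSqrt (l.count lb))).sum := by
  obtain ⟨h, hdec, hcnt⟩ := inv.wf
  have hwfp : pvWf N p h := by
    refine ⟨inv.plen, inv.pcl, hdec, ?_⟩
    intro x hx0 hx
    have h1 := hcnt x hx0 hx
    have h2 : l.count (pvG l x) ≤ l.length := List.count_le_length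
    have h3 := inv.llen
    omega
  have hP : ∀ i ∈ PySem.List.pyRange 1 b 1, 0 ≤ i ∧ i < (N:Int) := by
    intro i hi
    have := PySem.List.mem_pyRange_one.1 hi
    omega
  have hloop := pvLoopA N p s l m inv h hwfp (PySem.List.pyRange 1 b 1) hP
    p PySem.Set.empty 0 PySem.Set.empty hwfp (fun y _ _ => rfl)
    (by intro i _ _; simp [PySem.Set.empty])
  rw [hloop, pvAnsSpec_eq]
  have hfe : ((PySem.Set.ofList ((PySem.List.pyRange 1 b 1).map (pvG l))).filter
      (fun lb => !(PySem.Set.contains PySem.Set.empty lb))) =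
      (PySem.Set.ofList ((PySem.List.pyRange 1 b 1).map (pvG l))) := by
    apply List.filter_eq_self.2
    intro a _
    rfl
  rw [hfe, zero_add]

-- ---- B's counting dict computes the same sum ----
theorem pvFinalB (N : Nat) (l : List Int) (llen : l.length = N)
    (lr : ∀ x : Int, 0 ≤ x → x < (N:Int) → 0 ≤ pvG l x ∧ pvG l x < (N:Int))
    (lp : ∀ x : Int, 1 ≤ x → x < (N:Int) → 1 ≤ pvG l x)
    (lz : 0 < N → pvG l 0 = 0) (b : Int) (hb : b.toNat = N) :
    (((PySem.List.pyRange 1 b 1).foldl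
      (fun d i => d.insert (pvG l i) (d.getD (pvG l i) 0 + 1))
      (PySem.Dict.empty : PySem.Dict Int Int)).values.foldl
        (fun ans c => ans + pvCeilSqrt c) 0) =
    ((PySem.Set.ofList ((PySem.List.pyRange 1 b 1).map (pvG l))).map
      (fun lb => pvCeilSqrt (l.count lb))).sum := by
  by_cases hbpos : 0 < b
  · have hfoldmap : (PySem.List.pyRange 1 b 1).foldl
        (fun d i => d.insert (pvG l i) (d.getD (pvG l i) 0 + 1))
        (PySem.Dict.empty : PySem.Dict Int Int) =
        ((PySem.List.pyRange 1 b 1).map (pvG l)).foldl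
          (fun d c => d.insert c (d.getD c 0 + 1)) PySem.Dict.empty := by
      rw [List.foldl_map]
    rw [hfoldmap]
    have hnodup : ((((PySem.List.pyRange 1 b 1).map (pvG l)).foldl
        (fun d c => d.insert c (d.getD c 0 + 1))
        (PySem.Dict.empty : PySem.Dict Int Int))).keys.Nodup := by
      refine PySem.Dict.nodup_keys_foldl_insert _ _ _ ?_
      simp [PySem.Dict.keys_empty]
    rw [PySem.Dict.values_eq_map_keys _ hnodup (0:Int)]
    rw [PySem.Dict.keys_foldl_insert, PySem.Dict.keys_empty, PySem.Set.update_nil_left]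
    rw [PySem.List.foldl_add, List.map_map, zero_add]
    refine congrArg List.sum ?_
    apply List.map_congr_left
    intro lb hlb
    simp only [Function.comp]
    rw [PySem.Dict.getD_foldl_insert_add_one, PySem.Dict.getD_empty, zero_add]
    congr 1
    obtain ⟨i, hiP, hieq⟩ := List.mem_map.1 ((PySem.Set.mem_ofList _ _).1 hlb)
    have hib := PySem.List.mem_pyRange_one.1 hiP
    have hiN : i < (N:Int) := by omega
    have hlb1 : 1 ≤ lb := by rw [← hieq]; exact lp i hib.1 hiN
    have hcnt2 : List.count lb l =
        List.count lb ((PySem.List.pyRange 0 ((l.length:Nat):Int) 1).map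
          (fun j => PySem.List.pyGetD l j 0)) := by
      rw [PySem.List.map_pyGetD_pyRange_zero']
    have hlenb : ((l.length:Nat):Int) = b := by rw [llen]; omega
    rw [hcnt2, hlenb, PySem.List.pyRange_one_cons hbpos, List.map_cons, List.count_cons]
    have hz0 : PySem.List.pyGetD l (0:Int) 0 = 0 := lz (by omega)
    rw [hz0]
    have : ((0:Int) == lb) = false := by
      simp only [beq_eq_false_iff_ne, ne_eq]
      omega
    rw [this]
    rfl
  · have hnil : PySem.List.pyRange 1 b 1 = [] := PySem.List.pyRange_one_eq_nil (by omega)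
    rw [hnil]
    rfl


-- ===== VERDICT (by name: the statement is the Claim_ definition above) =====
theorem connectedSum_spec : Claim_equal_connectedSum := by
  intro n f t _ hpre
  show connectedSum n f t = connectedSum_alt n f t
  have hE : ∀ e ∈ List.zip f t,
      ((1 ≤ e.1 ∧ e.1 < (((n+1).toNat : Nat):Int)) ∨
        (1 - (((n+1).toNat : Nat):Int) ≤ e.1 ∧ e.1 ≤ -1)) ∧
      ((1 ≤ e.2 ∧ e.2 < (((n+1).toNat : Nat):Int)) ∨
        (1 - (((n+1).toNat : Nat):Int) ≤ e.2 ∧ e.2 ≤ -1)) := by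
    intro e he
    have := hpre e he
    omega
  have hfold := pvFold (n+1).toNat (List.zip f t) hE _ _ _ _ (pvInit (n+1))
  have hA := pvFinalA (n+1).toNat _ _ _ _ hfold (n+1) rfl
  have hB := pvFinalB (n+1).toNat _ hfold.llen hfold.lrange hfold.lpos hfold.lzero (n+1) rfl
  exact hA.trans hB.symm
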